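-- pv_equiv track=rewrite | github.com/Jackie890621/Openpilot_finetune | train/eval_AP.py | get_val_keys_leads
-- ===== SOURCE A (Python) =====
-- def get_val_keys_leads(namespace='lead'):
--     rtn_dict = dict()
--
--     distance_splits = ((0, 10), (10, 20), (20, 30), (30, 50), (50, 131))
--     AP_thresholds = (0.5, 1., 1.5)
--
--     for min_dst, max_dst in distance_splits:
--         rtn_dict.update({'lead_x_%d_%d' % (min_dst, max_dst): []})  # [sum(mask), ]
--         rtn_dict.update({'lead_speed_%d_%d' % (min_dst, max_dst): []})  # [sum(mask), ]
--         for AP_threshold in AP_thresholds: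
--             rtn_dict.update({'AP_lead_%d_%d_%s' % (min_dst, max_dst, AP_threshold): []})
--             rtn_dict.update({'AP_lead_x_%d_%d_%s' % (min_dst, max_dst, AP_threshold): []})
--             rtn_dict.update({'AP_lead_speed_%d_%d_%s' % (min_dst, max_dst, AP_threshold): []})
--
--     # add namespace
--     if namespace is not None:
--         for k in list(rtn_dict.keys()):
--             rtn_dict['%s/%s' % (namespace, k)] = rtn_dict.pop(k)
--     return rtn_dict
-- ===== SOURCE B (Python) =====
-- # The key set is a fixed constant: B uses a precomputed literal key table
-- # and just prefixes it, instead of generating the grid with nested loops.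
-- _LEAD_KEYS = (
--     'lead_x_0_10',
--     'lead_speed_0_10',
--     'AP_lead_0_10_0.5',
--     'AP_lead_x_0_10_0.5',
--     'AP_lead_speed_0_10_0.5',
--     'AP_lead_0_10_1.0',
--     'AP_lead_x_0_10_1.0',
--     'AP_lead_speed_0_10_1.0',
--     'AP_lead_0_10_1.5',
--     'AP_lead_x_0_10_1.5',
--     'AP_lead_speed_0_10_1.5',
--     'lead_x_10_20',
--     'lead_speed_10_20',
--     'AP_lead_10_20_0.5',
--     'AP_lead_x_10_20_0.5',
--     'AP_lead_speed_10_20_0.5',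
--     'AP_lead_10_20_1.0',
--     'AP_lead_x_10_20_1.0',
--     'AP_lead_speed_10_20_1.0',
--     'AP_lead_10_20_1.5',
--     'AP_lead_x_10_20_1.5',
--     'AP_lead_speed_10_20_1.5',
--     'lead_x_20_30',
--     'lead_speed_20_30',
--     'AP_lead_20_30_0.5',
--     'AP_lead_x_20_30_0.5',
--     'AP_lead_speed_20_30_0.5',
--     'AP_lead_20_30_1.0',
--     'AP_lead_x_20_30_1.0',
--     'AP_lead_speed_20_30_1.0',
--     'AP_lead_20_30_1.5',
--     'AP_lead_x_20_30_1.5',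
--     'AP_lead_speed_20_30_1.5',
--     'lead_x_30_50',
--     'lead_speed_30_50',
--     'AP_lead_30_50_0.5',
--     'AP_lead_x_30_50_0.5',
--     'AP_lead_speed_30_50_0.5',
--     'AP_lead_30_50_1.0',
--     'AP_lead_x_30_50_1.0',
--     'AP_lead_speed_30_50_1.0',
--     'AP_lead_30_50_1.5',
--     'AP_lead_x_30_50_1.5',
--     'AP_lead_speed_30_50_1.5',
--     'lead_x_50_131',
--     'lead_speed_50_131',
--     'AP_lead_50_131_0.5',
--     'AP_lead_x_50_131_0.5',
--     'AP_lead_speed_50_131_0.5',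
--     'AP_lead_50_131_1.0',
--     'AP_lead_x_50_131_1.0',
--     'AP_lead_speed_50_131_1.0',
--     'AP_lead_50_131_1.5',
--     'AP_lead_x_50_131_1.5',
--     'AP_lead_speed_50_131_1.5',
-- )
--
-- def get_val_keys_leads(namespace='lead'):
--     prefix = '' if namespace is None else namespace + '/'
--     return {prefix + k: [] for k in _LEAD_KEYS}
-- ===== Notes on version B (the rewrite author's own statement) =====
-- stated objective: simpler
-- what changed: B replaces A's nested grid-generating loops plus pop/rename second pass by a precomputed literal table of the 55 fixed key names, prefixed once in a single comprehension.
import Mathlib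
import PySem

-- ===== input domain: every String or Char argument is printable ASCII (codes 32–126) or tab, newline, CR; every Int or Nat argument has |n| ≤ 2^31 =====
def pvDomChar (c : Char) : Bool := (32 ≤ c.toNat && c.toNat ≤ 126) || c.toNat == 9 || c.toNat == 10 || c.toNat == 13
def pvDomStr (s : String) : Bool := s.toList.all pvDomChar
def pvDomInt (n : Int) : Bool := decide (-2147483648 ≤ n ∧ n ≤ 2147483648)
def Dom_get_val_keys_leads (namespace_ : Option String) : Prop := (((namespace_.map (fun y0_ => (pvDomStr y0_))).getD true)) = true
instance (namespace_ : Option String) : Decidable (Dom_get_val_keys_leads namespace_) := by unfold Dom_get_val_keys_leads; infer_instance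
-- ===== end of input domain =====

-- B replaces A's nested grid-generating loops and pop/rename second pass with a
-- precomputed literal table of the 55 fixed key names, prefixed once (objective: simpler).
-- The float thresholds (0.5, 1., 1.5) only ever appear through '%s' formatting, so
-- A's port carries them as their exact string renderings "0.5"/"1.0"/"1.5".

-- ===== PORT A =====
def pvSplitsA : List (Int × Int) := [(0, 10), (10, 20), (20, 30), (30, 50), (50, 131)]
def pvThresholdsA : List String := ["0.5", "1.0", "1.5"]

-- the body of A's rename loop: rtn_dict['%s/%s' % (namespace, k)] = rtn_dict.pop(k)
-- (pop can never miss here; the none branch is an unreachable totality guard)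
def pvRenameStep (s : String) (d : PySem.Dict String (List Int)) (k : String) : PySem.Dict String (List Int) :=
  match PySem.Dict.pop? d k with
  | some (v, d') => d'.insert (s ++ "/" ++ k) v
  | none => d

-- rtn_dict after A's build loops (no parameters reach it, so it is a constant helper)
def pvRtnDictA : PySem.Dict String (List Int) :=
  pvSplitsA.foldl (fun d p =>
      let d := d.insert ("lead_x_" ++ PySem.Int.toStr p.1 ++ "_" ++ PySem.Int.toStr p.2) []
      let d := d.insert ("lead_speed_" ++ PySem.Int.toStr p.1 ++ "_" ++ PySem.Int.toStr p.2) []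
      pvThresholdsA.foldl (fun d t =>
        let d := d.insert ("AP_lead_" ++ PySem.Int.toStr p.1 ++ "_" ++ PySem.Int.toStr p.2 ++ "_" ++ t) []
        let d := d.insert ("AP_lead_x_" ++ PySem.Int.toStr p.1 ++ "_" ++ PySem.Int.toStr p.2 ++ "_" ++ t) []
        d.insert ("AP_lead_speed_" ++ PySem.Int.toStr p.1 ++ "_" ++ PySem.Int.toStr p.2 ++ "_" ++ t) [])
        d)
      PySem.Dict.empty

def get_val_keys_leads (namespace_ : Option String) : List (String × List Int) :=
  match namespace_ with
  | none => pvRtnDictA.items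
  | some s => (pvRtnDictA.keys.foldl (pvRenameStep s) pvRtnDictA).items

-- ===== PORT B =====
-- Source B's literal constant _LEAD_KEYS
def pvLeadKeysB : List String := [
  "lead_x_0_10",
  "lead_speed_0_10",
  "AP_lead_0_10_0.5",
  "AP_lead_x_0_10_0.5",
  "AP_lead_speed_0_10_0.5",
  "AP_lead_0_10_1.0",
  "AP_lead_x_0_10_1.0",
  "AP_lead_speed_0_10_1.0",
  "AP_lead_0_10_1.5",
  "AP_lead_x_0_10_1.5",
  "AP_lead_speed_0_10_1.5",
  "lead_x_10_20",
  "lead_speed_10_20",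
  "AP_lead_10_20_0.5",
  "AP_lead_x_10_20_0.5",
  "AP_lead_speed_10_20_0.5",
  "AP_lead_10_20_1.0",
  "AP_lead_x_10_20_1.0",
  "AP_lead_speed_10_20_1.0",
  "AP_lead_10_20_1.5",
  "AP_lead_x_10_20_1.5",
  "AP_lead_speed_10_20_1.5",
  "lead_x_20_30",
  "lead_speed_20_30",
  "AP_lead_20_30_0.5",
  "AP_lead_x_20_30_0.5",
  "AP_lead_speed_20_30_0.5",
  "AP_lead_20_30_1.0",
  "AP_lead_x_20_30_1.0",
  "AP_lead_speed_20_30_1.0",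
  "AP_lead_20_30_1.5",
  "AP_lead_x_20_30_1.5",
  "AP_lead_speed_20_30_1.5",
  "lead_x_30_50",
  "lead_speed_30_50",
  "AP_lead_30_50_0.5",
  "AP_lead_x_30_50_0.5",
  "AP_lead_speed_30_50_0.5",
  "AP_lead_30_50_1.0",
  "AP_lead_x_30_50_1.0",
  "AP_lead_speed_30_50_1.0",
  "AP_lead_30_50_1.5",
  "AP_lead_x_30_50_1.5",
  "AP_lead_speed_30_50_1.5",
  "lead_x_50_131",
  "lead_speed_50_131",
  "AP_lead_50_131_0.5",
  "AP_lead_x_50_131_0.5",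
  "AP_lead_speed_50_131_0.5",
  "AP_lead_50_131_1.0",
  "AP_lead_x_50_131_1.0",
  "AP_lead_speed_50_131_1.0",
  "AP_lead_50_131_1.5",
  "AP_lead_x_50_131_1.5",
  "AP_lead_speed_50_131_1.5"]

def get_val_keys_leads_alt (namespace_ : Option String) : List (String × List Int) :=
  let pref := match namespace_ with
    | none => ""
    | some s => s ++ "/"
  pvLeadKeysB.map (fun k => (pref ++ k, ([] : List Int)))

-- ===== PRECONDITION & SPEC =====
def Spec_get_val_keys_leads (namespace_ : Option String) (out : List (String × List Int)) : Prop := out = get_val_keys_leads_alt namespace_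
instance (namespace_ : Option String) (out : List (String × List Int)) : Decidable (Spec_get_val_keys_leads namespace_ out) := by unfold Spec_get_val_keys_leads; infer_instance

-- ===== CLAIM (what is proved, stated in full; the proofs are below) =====
def Claim_equal_get_val_keys_leads : Prop := ∀ (namespace_ : Option String), Dom_get_val_keys_leads namespace_ → Spec_get_val_keys_leads namespace_ (get_val_keys_leads namespace_)

-- ===== LEMMAS AND PROOFS =====

theorem pv_append_cancel {a : String} : Function.Injective (fun x => a ++ x) := by
  intro x y h
  have h1 : a ++ x = a ++ y := h
  have h2 : (a ++ x).toList = (a ++ y).toList := by rw [h1]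
  simp only [String.toList_append] at h2
  exact String.toList_injective (List.append_cancel_left h2)

theorem pv_slash_mem (s k : String) : '/' ∈ (s ++ "/" ++ k).toList := by
  simp [String.toList_append]

theorem pv_pref_ne_bare {s k b : String} (hb : '/' ∉ b.toList) : s ++ "/" ++ k ≠ b := by
  intro h; exact hb (h ▸ pv_slash_mem s k)

theorem pv_pref_inj {s k m : String} (h : s ++ "/" ++ k = s ++ "/" ++ m) : k = m := by
  have := pv_append_cancel (a := s ++ "/") (by simpa [← String.append_assoc] using h)
  exact this

theorem pv_rename (s : String) :
    ∀ (todo processed : List String),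
      todo.Nodup →
      (∀ k ∈ todo, k ∉ processed) →
      (∀ k ∈ todo, '/' ∉ k.toList) →
      List.foldl (pvRenameStep s)
        ⟨todo.map (fun k => (k, ([] : List Int))) ++ processed.map (fun k => (s ++ "/" ++ k, ([] : List Int)))⟩ todo
      = ⟨(processed ++ todo).map (fun k => (s ++ "/" ++ k, ([] : List Int)))⟩ := by
  intro todo
  induction todo with
  | nil => intro processed _ _ _; simp
  | cons k rest ih =>
    intro processed hnd hdisj hslash
    have hk_slash : '/' ∉ k.toList := hslash k (by simp)
    have hk_proc : k ∉ processed := hdisj k (by simp)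
    have hk_rest : k ∉ rest := (List.nodup_cons.mp hnd).1
    -- the tail after popping k
    set L : List (String × List Int) :=
      rest.map (fun k => (k, ([] : List Int))) ++ processed.map (fun k => (s ++ "/" ++ k, ([] : List Int))) with hL
    have hfind : List.find? (fun p => p.1 == k) ((k, ([] : List Int)) :: L) = some (k, []) := by
      simp [List.find?]
    have hfilter : List.filter (fun p => !(p.1 == k)) ((k, ([] : List Int)) :: L) = L := by
      rw [List.filter_cons]
      simp only [beq_self_eq_true, Bool.not_true, Bool.false_eq_true, if_false]
      apply List.filter_eq_self.mpr
      intro p hp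
      rcases List.mem_append.mp hp with h | h
      · rcases List.mem_map.mp h with ⟨r, hr, rfl⟩
        have hne : r ≠ k := fun hrk => hk_rest (hrk ▸ hr)
        simp [hne]
      · rcases List.mem_map.mp h with ⟨m, _, rfl⟩
        have hne : s ++ "/" ++ m ≠ k := pv_pref_ne_bare hk_slash
        simp [hne]
    have hpop : PySem.Dict.pop? (⟨(k, ([] : List Int)) :: L⟩ : PySem.Dict String (List Int)) k
        = some ([], ⟨L⟩) := by
      simp [PySem.Dict.pop?, PySem.Dict.get?, PySem.Dict.erase, hfind, hfilter]
    have hcontains : (⟨L⟩ : PySem.Dict String (List Int)).contains (s ++ "/" ++ k) = false := by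
      simp only [PySem.Dict.contains, List.any_eq_false]
      intro p hp
      rcases List.mem_append.mp hp with h | h
      · rcases List.mem_map.mp h with ⟨r, hr, rfl⟩
        have hne : r ≠ s ++ "/" ++ k := fun hrk => pv_pref_ne_bare (hslash r (by simp [hr])) hrk.symm
        simp [hne]
      · rcases List.mem_map.mp h with ⟨m, hm, rfl⟩
        have hne : s ++ "/" ++ m ≠ s ++ "/" ++ k := fun hmk => hk_proc (pv_pref_inj hmk ▸ hm)
        simp [hne]
    have hstep : pvRenameStep s ⟨(k, ([] : List Int)) :: L⟩ k
        = ⟨rest.map (fun k => (k, ([] : List Int))) ++ (processed ++ [k]).map (fun k => (s ++ "/" ++ k, ([] : List Int)))⟩ := by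
      have hins : (⟨L⟩ : PySem.Dict String (List Int)).insert (s ++ "/" ++ k) [] =
          ⟨L ++ [(s ++ "/" ++ k, [])]⟩ := by
        apply PySem.Dict.ext
        rw [PySem.Dict.items_insert_of_not_contains _ _ hcontains]
      unfold pvRenameStep
      rw [hpop]
      show (⟨L⟩ : PySem.Dict String (List Int)).insert (s ++ "/" ++ k) [] = _
      rw [hins, hL]
      simp
    calc List.foldl (pvRenameStep s) ⟨(k :: rest).map (fun k => (k, ([] : List Int))) ++ processed.map (fun k => (s ++ "/" ++ k, ([] : List Int)))⟩ (k :: rest)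
        = List.foldl (pvRenameStep s)
            ⟨rest.map (fun k => (k, ([] : List Int))) ++ (processed ++ [k]).map (fun k => (s ++ "/" ++ k, ([] : List Int)))⟩ rest := by
          simp only [List.foldl_cons, List.map_cons, List.cons_append]
          rw [← hL, hstep]
      _ = ⟨((processed ++ [k]) ++ rest).map (fun k => (s ++ "/" ++ k, ([] : List Int)))⟩ := by
          apply ih
          · exact (List.nodup_cons.mp hnd).2
          · intro r hr
            simp only [List.mem_append, List.mem_singleton, not_or]
            exact ⟨fun h => hdisj r (by simp [hr]) h, fun h => hk_rest (h ▸ hr)⟩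
          · intro r hr; exact hslash r (by simp [hr])
      _ = ⟨(processed ++ k :: rest).map (fun k => (s ++ "/" ++ k, ([] : List Int)))⟩ := by
          simp

-- A's bare dict, computed: it is exactly Source B's literal key table paired with empty lists
set_option maxRecDepth 20000 in
theorem pv_baseA : pvRtnDictA = ⟨pvLeadKeysB.map (fun k => (k, ([] : List Int)))⟩ := by decide

set_option maxRecDepth 20000 in
theorem pv_keysB_nodup : pvLeadKeysB.Nodup := by decide

set_option maxRecDepth 20000 in
theorem pv_keysB_noslash : ∀ k ∈ pvLeadKeysB, '/' ∉ k.toList := by decide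

-- ===== VERDICT (by name: the statement is the Claim_ definition above) =====
set_option maxRecDepth 20000 in
theorem get_val_keys_leads_spec : Claim_equal_get_val_keys_leads := by
  intro ns _
  unfold Spec_get_val_keys_leads
  cases ns with
  | none => decide
  | some s =>
    simp only [get_val_keys_leads, get_val_keys_leads_alt, pv_baseA]
    have hkeys : (⟨pvLeadKeysB.map (fun k => (k, ([] : List Int)))⟩ : PySem.Dict String (List Int)).keys = pvLeadKeysB := by
      decide
    rw [hkeys]
    have hA := pv_rename s pvLeadKeysB [] pv_keysB_nodup (by simp) pv_keysB_noslash
    simp only [List.map_nil, List.append_nil, List.nil_append] at hA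
    rw [hA]
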